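-- pv_equiv track=rewrite | github.com/egormeister-os/AOIS | lab2/boollab/minimization.py | _pattern_from_cells
-- ===== SOURCE A (Python) =====
-- def _pattern_from_cells(cells: tuple[tuple[int, ...], ...]) -> str:
--     if not cells:
--         return ""
--     width = len(cells[0])
--     pattern = []
--     for position in range(width):
--         values = {bits[position] for bits in cells}
--         pattern.append(str(values.pop()) if len(values) == 1 else "-")
--     return "".join(pattern)
-- ===== SOURCE B (Python) =====
-- def _pattern_from_cells(cells):
--     if not cells:
--         return ""
--     # running pattern: the value all rows agreed on so far, or None once a
--     # position has seen two different values
--     pattern = list(cells[0])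
--     for row in cells[1:]:
--         pattern = [p if p is not None and b == p else None
--                    for p, b in zip(pattern, row)]
--     return "".join("-" if p is None else str(p) for p in pattern)
-- ===== Notes on version B (the rewrite author's own statement) =====
-- stated objective: faster
-- what changed: Inverted loop nesting with a running accumulator: instead of building a fresh set per column over all rows, B seeds the pattern from the first row and sweeps the remaining rows once, demoting a position to None on the first disagreement; stringification happens once at the end.
import Mathlib
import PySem

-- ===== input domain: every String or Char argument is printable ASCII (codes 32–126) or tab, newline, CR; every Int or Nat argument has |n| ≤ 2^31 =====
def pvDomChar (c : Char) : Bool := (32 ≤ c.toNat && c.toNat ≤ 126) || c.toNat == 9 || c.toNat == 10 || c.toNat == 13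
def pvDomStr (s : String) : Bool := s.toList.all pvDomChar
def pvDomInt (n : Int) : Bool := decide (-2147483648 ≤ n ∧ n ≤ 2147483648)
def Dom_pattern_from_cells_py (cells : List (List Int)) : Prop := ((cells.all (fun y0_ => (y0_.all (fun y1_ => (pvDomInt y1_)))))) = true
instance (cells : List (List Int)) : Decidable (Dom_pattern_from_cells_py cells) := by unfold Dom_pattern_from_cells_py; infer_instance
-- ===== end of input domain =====

-- B replaces A's per-column set construction by a single row-wise sweep that
-- maintains a running pattern accumulator (objective: faster by a constant
-- factor — no per-column set allocation).

-- ===== PORT A =====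
-- 'bits[position]' is ported with the total pyGetD (IndexError inputs are excluded by Pre_).
-- 'values.pop()' on the singleton set is its unique element (headD).
def pattern_from_cells_py (cells : List (List Int)) : String :=
  match cells with
  | [] => ""
  | c0 :: rest =>
    let width : Int := PySem.List.len c0
    let pattern : List String :=
      (PySem.List.pyRange 0 width 1).foldl (fun pat position =>
        let values : PySem.Set Int :=
          PySem.Set.ofList ((c0 :: rest).map (fun bits => PySem.List.pyGetD bits position 0))
        pat ++ [if PySem.Set.len values = 1 then PySem.Int.toStr (values.headD 0) else "-"]) []
    PySem.Str.join "" pattern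

-- ===== PORT B =====
def pattern_from_cells_py_alt (cells : List (List Int)) : String :=
  match cells with
  | [] => ""
  | c0 :: rest =>
    let pattern : List (Option Int) :=
      rest.foldl (fun pat row =>
        List.zipWith (fun p b =>
          match p with
          | some v => if b = v then some v else none
          | none => none) pat row)
        (c0.map some)
    PySem.Str.join "" (pattern.map (fun p =>
      match p with
      | none => "-"
      | some v => PySem.Int.toStr v))

-- ===== PRECONDITION & SPEC =====
-- Pre_ excludes exactly the inputs where A raises IndexError: some row shorter than the first row.
def Pre_pattern_from_cells_py (cells : List (List Int)) : Prop :=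
  ∀ row ∈ cells, (cells.headD []).length ≤ row.length
instance (cells : List (List Int)) : Decidable (Pre_pattern_from_cells_py cells) := by
  unfold Pre_pattern_from_cells_py; infer_instance
def pvWitness_pattern_from_cells_py : List (List Int) := [[0, 1], [1, 1], [0, 0]]

def Spec_pattern_from_cells_py (cells : List (List Int)) (out : String) : Prop := out = pattern_from_cells_py_alt cells
instance (cells : List (List Int)) (out : String) : Decidable (Spec_pattern_from_cells_py cells out) := by unfold Spec_pattern_from_cells_py; infer_instance

-- ===== CLAIM (what is proved, stated in full; the proofs are below) =====
def Claim_equal_pattern_from_cells_py : Prop := ∀ (cells : List (List Int)), Dom_pattern_from_cells_py cells → Pre_pattern_from_cells_py cells → Spec_pattern_from_cells_py cells (pattern_from_cells_py cells)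

-- ===== LEMMAS AND PROOFS =====

-- folding "append one element" is a map
lemma pv_foldl_push {α β : Type} (l : List α) (f : α → β) (init : List β) :
    l.foldl (fun acc x => acc ++ [f x]) init = init ++ l.map f := by
  induction l generalizing init with
  | nil => simp
  | cons x xs ih => simp [List.foldl, ih]

-- a set built from a nonempty list is a singleton iff all elements equal the head
lemma pv_set_singleton_iff (a : Int) (l : List Int) :
    (PySem.Set.ofList (a :: l)).length = 1 ↔ ∀ x ∈ l, x = a := by
  rw [PySem.Set.ofList_cons]
  simp only [List.length_cons, Nat.add_eq_right, List.length_eq_zero_iff,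
    List.eq_nil_iff_forall_not_mem, PySem.Set.mem_discard, PySem.Set.mem_ofList]
  constructor
  · intro h x hx
    by_contra hne
    exact h x ⟨hx, hne⟩
  · rintro h x ⟨hx, hne⟩
    exact hne (h x hx)

lemma pv_set_head (a : Int) (l : List Int) :
    (PySem.Set.ofList (a :: l)).headD 0 = a := by
  rw [PySem.Set.ofList_cons]; rfl

-- B's per-position update
def pvUpd (p : Option Int) (b : Int) : Option Int :=
  match p with
  | some v => if b = v then some v else none
  | none => none

lemma pv_foldl_upd_none (rows : List Int) :
    rows.foldl (fun p b => pvUpd p b) none = none := by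
  induction rows with
  | nil => rfl
  | cons r rows ih =>
    rw [List.foldl_cons, show pvUpd none r = none from rfl]
    exact ih

lemma pv_foldl_upd_some (rows : List Int) (v : Int) :
    rows.foldl (fun p b => pvUpd p b) (some v) =
      if ∀ b ∈ rows, b = v then some v else none := by
  induction rows with
  | nil => simp
  | cons r rows ih =>
    rw [List.foldl_cons]
    by_cases hr : r = v
    · subst hr
      rw [show pvUpd (some r) r = some r by simp [pvUpd], ih]
      by_cases h : ∀ b ∈ rows, b = r
      · simp
      · rw [if_neg h, if_neg]
        intro hall
        exact h (fun b hb => hall b (List.mem_cons_of_mem _ hb))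
    · rw [show pvUpd (some v) r = none by simp [pvUpd, hr], pv_foldl_upd_none, if_neg]
      intro hall
      exact hr (hall r (by simp))

-- one zipWith step, pointwise on a range-indexed pattern
lemma pv_zip_step (e : Nat → Option Int) (w : Nat) (row : List Int) (h : w ≤ row.length) :
    List.zipWith (fun p b =>
        match p with
        | some v => if b = v then some v else none
        | none => none) ((List.range w).map e) row =
      (List.range w).map (fun j => pvUpd (e j) (row.getD j 0)) := by
  apply List.ext_getElem
  · simp [Nat.min_eq_left h]
  · intro j h1 h2
    have hj : j < w := by simpa using h2
    have hjr : j < row.length := lt_of_lt_of_le hj h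
    simp [List.getElem_zipWith, pvUpd, List.getD_eq_getElem?_getD, List.getElem?_eq_getElem hjr]

-- the whole B fold, pointwise
lemma pv_fold_char (rest : List (List Int)) (w : Nat) (e : Nat → Option Int)
    (hlen : ∀ row ∈ rest, w ≤ row.length) :
    rest.foldl (fun pat row =>
        List.zipWith (fun p b =>
          match p with
          | some v => if b = v then some v else none
          | none => none) pat row) ((List.range w).map e) =
      (List.range w).map (fun j =>
        rest.foldl (fun p row => pvUpd p (row.getD j 0)) (e j)) := by
  induction rest generalizing e with
  | nil => rfl
  | cons row rest ih =>
    have hrow : w ≤ row.length := hlen row (by simp)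
    have hrest : ∀ r ∈ rest, w ≤ r.length := fun r hr => hlen r (by simp [hr])
    simp only [List.foldl_cons]
    rw [pv_zip_step e w row hrow, ih (fun j => pvUpd (e j) (row.getD j 0)) hrest]

lemma pv_map_some (l : List Int) :
    l.map some = (List.range l.length).map (fun j => some (l.getD j 0)) := by
  apply List.ext_getElem
  · simp
  · intro j h1 h2
    simp [List.getD_eq_getElem?_getD, List.getElem?_eq_getElem (show j < l.length by simpa using h1)]

-- ===== VERDICT (by name: the statement is the Claim_ definition above) =====
theorem pattern_from_cells_py_spec : Claim_equal_pattern_from_cells_py := by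
  intro cells _ hpre
  unfold Spec_pattern_from_cells_py
  match cells with
  | [] => rfl
  | c0 :: rest =>
    unfold pattern_from_cells_py pattern_from_cells_py_alt
    simp only []
    have hpre' : ∀ row ∈ rest, c0.length ≤ row.length := by
      intro row hr
      simpa using hpre row (by simp [hr])
    -- B side
    rw [pv_map_some c0,
        pv_fold_char rest c0.length (fun j => some (c0.getD j 0)) hpre']
    -- A side
    rw [show PySem.List.pyRange 0 (PySem.List.len c0) 1
          = (List.range c0.length).map (fun (k : Nat) => (k : Int)) by
      rw [PySem.List.pyRange_one]
      simp only [PySem.List.len_eq, Int.sub_zero, Int.toNat_natCast]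
      exact List.map_congr_left (fun a _ => by omega)]
    rw [List.foldl_map, pv_foldl_push]
    simp only [List.nil_append, List.map_map]
    congr 1
    apply List.map_congr_left
    intro j hj
    have hjw : j < c0.length := List.mem_range.mp hj
    have hget : ∀ row : List Int, c0.length ≤ row.length →
        PySem.List.pyGetD row ((j : Int)) 0 = row.getD j 0 := by
      intro row hle
      simp [PySem.List.pyGetD_natCast]
    simp only [Function.comp, List.map_cons]
    rw [hget c0 le_rfl]
    have hmap : rest.map (fun bits => PySem.List.pyGetD bits ((j : Int)) 0)
        = rest.map (fun bits => bits.getD j 0) := by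
      apply List.map_congr_left
      intro row hr
      exact hget row (hpre' row hr)
    rw [hmap, ← List.foldl_map, pv_foldl_upd_some]
    by_cases hall : ∀ row ∈ rest, row.getD j 0 = c0.getD j 0
    · have hall' : ∀ b ∈ List.map (fun bits => bits.getD j 0) rest, b = c0.getD j 0 := by
        intro b hb
        obtain ⟨row, hr, rfl⟩ := List.mem_map.mp hb
        exact hall row hr
      have h1 := (pv_set_singleton_iff (c0.getD j 0) (List.map (fun bits => bits.getD j 0) rest)).mpr hall'
      have hh := pv_set_head (c0.getD j 0) (List.map (fun bits => bits.getD j 0) rest)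
      rw [if_pos hall']
      simp only [List.getD_eq_getElem?_getD] at h1
      simp only [List.headD_eq_head?_getD, List.getD_eq_getElem?_getD] at hh
      simp [PySem.Set.len, h1, hh]
    · have h1 : ¬ (PySem.Set.ofList (c0.getD j 0 :: List.map (fun bits => bits.getD j 0) rest)).length = 1 := by
        intro h
        exact hall (fun row hr => (pv_set_singleton_iff _ _).mp h _ (List.mem_map.mpr ⟨row, hr, rfl⟩))
      have hall' : ¬ ∀ b ∈ List.map (fun bits => bits.getD j 0) rest, b = c0.getD j 0 := by
        intro h
        exact hall (fun row hr => h _ (List.mem_map.mpr ⟨row, hr, rfl⟩))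
      rw [if_neg hall']
      simp only [List.getD_eq_getElem?_getD] at h1
      simp [PySem.Set.len, h1]
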